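-- pv_equiv track=rewrite | github.com/sanchopanca/coding-for-pleasure | project-euler/python/p0065.py | denominators_e
-- ===== SOURCE A (Python) =====
-- def denominators_e(n):
--     k = 1
--     res = []
--     while len(res) < n:
--         res.append(1)
--         res.append(2 * k)
--         res.append(1)
--         k += 1
--     return list(reversed(res[:n]))
-- ===== SOURCE B (Python) =====
-- def denominators_e(n):
--     return [2 * (i // 3 + 1) if i % 3 == 1 else 1 for i in range(n)][::-1]
-- ===== Notes on version B (the rewrite author's own statement) =====
-- stated objective: simpler
-- what changed: Each term is computed directly from its index by a closed-form rule (2*(i//3+1) at positions i%3==1, else 1) in one comprehension over range(n), replacing the while-loop that appends triples until overshooting and then slices back to n.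
import Mathlib
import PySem

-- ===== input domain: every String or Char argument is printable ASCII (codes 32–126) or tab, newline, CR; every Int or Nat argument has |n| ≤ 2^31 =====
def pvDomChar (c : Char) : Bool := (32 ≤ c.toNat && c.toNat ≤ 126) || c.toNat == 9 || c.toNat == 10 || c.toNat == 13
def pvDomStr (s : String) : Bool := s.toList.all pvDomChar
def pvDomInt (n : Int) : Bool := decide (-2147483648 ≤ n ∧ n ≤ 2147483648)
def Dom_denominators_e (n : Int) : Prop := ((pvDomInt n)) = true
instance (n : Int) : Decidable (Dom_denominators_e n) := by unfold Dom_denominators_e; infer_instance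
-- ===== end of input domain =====

-- B computes each term from its index with a closed-form rule instead of A's
-- append-triples-then-slice while loop; same cost, simpler decomposition.

-- ===== PORT A =====
-- while len(res) < n: res.append(1); res.append(2*k); res.append(1); k += 1
def denomLoop (n k : Int) (res : List Int) : List Int :=
  if (res.length : Int) < n then denomLoop n (k + 1) (res ++ [1, 2 * k, 1]) else res
termination_by (n - res.length).toNat
decreasing_by simp only [List.length_append, List.length_cons, List.length_nil]; omega

def denominators_e (n : Int) : List Int :=
  (PySem.List.slice (denomLoop n 1 []) none (some n)).reverse

-- ===== PORT B =====
def denominators_e_alt (n : Int) : List Int :=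
  ((PySem.List.pyRange 0 n 1).map
    (fun i => if PySem.Int.mod i 3 = 1 then 2 * (PySem.Int.floordiv i 3 + 1) else 1)).reverse

-- ===== PRECONDITION & SPEC =====
def Spec_denominators_e (n : Int) (out : List Int) : Prop := out = denominators_e_alt n
instance (n : Int) (out : List Int) : Decidable (Spec_denominators_e n out) := by unfold Spec_denominators_e; infer_instance

-- ===== CLAIM (what is proved, stated in full; the proofs are below) =====
def Claim_equal_denominators_e : Prop := ∀ (n : Int), Dom_denominators_e n → Spec_denominators_e n (denominators_e n)

-- ===== LEMMAS AND PROOFS =====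

-- the n-independent term sequence, indexed from 0
def eSeq (m : Nat) : Int := if m % 3 = 1 then 2 * ((m / 3 : Nat) + 1) else 1

theorem eSeq_triple (j : Nat) :
    (List.range (3 * (j + 1))).map eSeq
      = (List.range (3 * j)).map eSeq ++ [1, 2 * ((j : Int) + 1), 1] := by
  have h3 : 3 * (j + 1) = (3 * j) + 1 + 1 + 1 := by ring
  have e0 : eSeq (3 * j) = 1 := by simp [eSeq, Nat.mul_mod_right]
  have e1 : eSeq (3 * j + 1) = 2 * ((j : Int) + 1) := by
    have hm : (3 * j + 1) % 3 = 1 := by omega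
    have hd : (3 * j + 1) / 3 = j := by omega
    simp [eSeq, hm, hd]
  have e2 : eSeq (3 * j + 1 + 1) = 1 := by
    have hm : (3 * j + 1 + 1) % 3 = 2 := by omega
    simp [eSeq, hm]
  rw [h3, List.range_succ, List.range_succ, List.range_succ]
  simp [e0, e1, e2]

theorem denomLoop_spec (n : Int) (f : Nat) : ∀ j : Nat, n ≤ 3 * ((j : Int) + f) →
    ∃ j' : Nat, denomLoop n ((j : Int) + 1) ((List.range (3 * j)).map eSeq)
        = (List.range (3 * j')).map eSeq ∧ n ≤ 3 * (j' : Int) := by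
  induction f with
  | zero =>
    intro j hj
    rw [denomLoop]
    have hlen : ¬ ((((List.range (3 * j)).map eSeq).length : Int) < n) := by
      simp only [List.length_map, List.length_range]
      push_cast; omega
    rw [if_neg hlen]
    exact ⟨j, rfl, by push_cast at hj ⊢; omega⟩
  | succ f ih =>
    intro j hj
    by_cases hlt : (((List.range (3 * j)).map eSeq).length : Int) < n
    · rw [denomLoop, if_pos hlt]
      have hstep : (List.range (3 * j)).map eSeq ++ [1, 2 * ((j : Int) + 1), 1]
          = (List.range (3 * (j + 1))).map eSeq := (eSeq_triple j).symm
      have hk : ((j : Int) + 1) + 1 = ((j + 1 : Nat) : Int) + 1 := by push_cast; ring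
      rw [hstep, hk]
      exact ih (j + 1) (by push_cast at hj ⊢; omega)
    · rw [denomLoop, if_neg hlt]
      refine ⟨j, rfl, ?_⟩
      simp only [List.length_map, List.length_range] at hlt
      push_cast at hlt ⊢; omega

theorem f_cast (m : Nat) :
    (if PySem.Int.mod (m : Int) 3 = 1 then 2 * (PySem.Int.floordiv (m : Int) 3 + 1) else 1)
      = eSeq m := by
  have h1 : PySem.Int.mod (m : Int) 3 = ((m % 3 : Nat) : Int) := by
    exact_mod_cast PySem.Int.mod_natCast m 3
  have h2 : PySem.Int.floordiv (m : Int) 3 = ((m / 3 : Nat) : Int) := by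
    exact_mod_cast PySem.Int.floordiv_natCast m 3
  rw [h1, h2]
  unfold eSeq
  by_cases h : m % 3 = 1
  · simp [h]
  · have hne : ((m : Int)) % 3 ≠ 1 := by omega
    simp [h, hne]

-- ===== VERDICT (by name: the statement is the Claim_ definition above) =====
theorem denominators_e_spec : Claim_equal_denominators_e := by
  intro n _
  unfold Spec_denominators_e denominators_e denominators_e_alt
  by_cases hn : n ≤ 0
  · rw [denomLoop]
    have hc : ¬ ((([] : List Int).length : Int) < n) := by simp; omega
    rw [if_neg hc, PySem.List.pyRange_one_eq_nil hn]
    simp [PySem.List.slice]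
  · push Not at hn
    obtain ⟨j', hj, hn'⟩ := denomLoop_spec n n.toNat 0 (by push_cast; omega)
    have h0 : ((0 : Nat) : Int) + 1 = (1 : Int) := by norm_num
    rw [h0] at hj
    simp only [Nat.mul_zero, List.range_zero, List.map_nil] at hj
    rw [hj, PySem.List.slice_to _ (le_of_lt hn)]
    have hA : ((List.range (3 * j')).map eSeq).take n.toNat
        = (List.range n.toNat).map eSeq := by
      rw [← List.map_take, List.take_range]
      have hmin : min n.toNat (3 * j') = n.toNat := by omega
      rw [hmin]
    rw [hA]
    have hcast : n = ((n.toNat : Nat) : Int) := by omega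
    rw [hcast, PySem.List.pyRange_zero_natCast]
    rw [List.map_map]
    congr 1
    exact (List.map_congr_left (fun m _ => (f_cast m).symm))
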